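-- pv_equiv track=rewrite | github.com/hacker65536/aws-ri-analyzer | ri_analyzer/fetchers/athena.py | _bind_params
-- ===== SOURCE A (Python) =====
-- from typing import Any, Dict, Iterator, List, Optional, Tuple
--
-- def _bind_params(sql: str, params: List[str]) -> str:
--     """? プレースホルダを params でクライアントサイド置換する。
--
--     Note: Athena の PreparedStatement は別 API が必要なため、
--     シンプルに文字列置換する。SQL インジェクションに注意して
--     数値・文字列リテラル以外は渡さないこと。
--     """
--     result = []
--     param_iter = iter(params)
--     for ch in sql:
--         if ch == "?":
--             val = next(param_iter)
--             # シングルクォートをエスケープして文字列リテラル化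
--             result.append(f"'{val.replace(chr(39), chr(39)*2)}'")
--         else:
--             result.append(ch)
--     return "".join(result)
-- ===== SOURCE B (Python) =====
-- from typing import List
--
-- def _bind_params(sql: str, params: List[str]) -> str:
--     """Recursive partition: split off the text before the first '?', bind the
--     head param there (quoted, with single quotes doubled), recurse on the rest."""
--     before, sep, after = sql.partition("?")
--     if not sep:
--         return before
--     quoted = "'" + params[0].replace("'", "''") + "'"
--     return before + quoted + _bind_params(after, params[1:])
-- ===== Notes on version B (the rewrite author's own statement) =====
-- stated objective: simpler
-- what changed: B is a short recursion on str.partition('?'): bind the head param before the first placeholder and recurse on the tail, instead of A's character-by-character scan with an explicit iterator and a pieces list.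
import Mathlib
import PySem

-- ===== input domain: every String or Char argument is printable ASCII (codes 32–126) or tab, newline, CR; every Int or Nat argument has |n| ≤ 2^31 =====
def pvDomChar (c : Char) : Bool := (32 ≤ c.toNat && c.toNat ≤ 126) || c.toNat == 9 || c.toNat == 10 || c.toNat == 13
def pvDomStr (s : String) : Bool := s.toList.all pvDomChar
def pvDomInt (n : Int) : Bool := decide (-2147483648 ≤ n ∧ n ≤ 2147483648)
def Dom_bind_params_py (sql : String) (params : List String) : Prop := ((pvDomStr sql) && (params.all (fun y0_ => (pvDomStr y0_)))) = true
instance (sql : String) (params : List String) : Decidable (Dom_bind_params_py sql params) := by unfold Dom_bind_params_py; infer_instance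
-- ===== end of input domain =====

-- B replaces A's character-by-character scan with a short recursion on partition('?') (simpler, same cost).
-- Both Pythons raise (StopIteration in A, IndexError in B) when '?' outnumber the params; Pre_ excludes exactly those inputs.

-- ===== PORT A =====
-- A: for ch in sql: append ch, or "'" ++ val.replace("'","''") ++ "'" consuming the next param; none = StopIteration
def pvGoA : List Char → List String → List Char → Option (List Char)
  | [], _, acc => some acc
  | c :: cs, ps, acc =>
    if c = '?' then
      match ps with
      | [] => none
      | v :: rest => pvGoA cs rest (acc ++ ('\'' :: (PySem.Str.replace v "'" "''").toList ++ ['\'']))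
    else pvGoA cs ps (acc ++ [c])

def bind_params_py (sql : String) (params : List String) : String :=
  String.ofList ((pvGoA sql.toList params []).getD [])

-- ===== PORT B =====
-- quoted = "'" + params[0].replace("'", "''") + "'"
def pvQuote (v : String) : List Char :=
  '\'' :: (PySem.Str.replace v "'" "''").toList ++ ['\'']

-- sql.partition("?") for the one-char separator is ported by hand, exactly:
-- before = takeWhile (· ≠ '?'), and dropWhile (· ≠ '?') is [] (no separator)
-- or the '?' followed by `after`.  none = IndexError on params[0].
def pvB (rest : List Char) (ps : List String) : Option (List Char) :=
  match h : rest.dropWhile (· ≠ '?') with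
  | [] => some (rest.takeWhile (· ≠ '?'))
  | _ :: after =>
    match ps with
    | [] => none
    | v :: vs => (pvB after vs).map (fun t => rest.takeWhile (· ≠ '?') ++ pvQuote v ++ t)
termination_by rest.length
decreasing_by
  have := List.length_dropWhile_le (p := fun c : Char => decide (c ≠ '?')) (l := rest)
  rw [h] at this; simp at this; omega


def bind_params_py_alt (sql : String) (params : List String) : String :=
  String.ofList ((pvB sql.toList params).getD [])

-- ===== PRECONDITION & SPEC =====
-- Pre_: both Pythons raise (StopIteration in A, IndexError in B) when sql has more '?' than params.
def Pre_bind_params_py (sql : String) (params : List String) : Prop :=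
  sql.toList.count '?' ≤ params.length
instance (sql : String) (params : List String) : Decidable (Pre_bind_params_py sql params) := by
  unfold Pre_bind_params_py; infer_instance
def pvWitness_bind_params_py : String × List String := ("SELECT * FROM t WHERE a = ? AND b = ?", ["x'y", "z"])
def Spec_bind_params_py (sql : String) (params : List String) (out : String) : Prop := out = bind_params_py_alt sql params
instance (sql : String) (params : List String) (out : String) : Decidable (Spec_bind_params_py sql params out) := by unfold Spec_bind_params_py; infer_instance

-- ===== CLAIM (what is proved, stated in full; the proofs are below) =====
def Claim_equal_bind_params_py : Prop := ∀ (sql : String) (params : List String), Dom_bind_params_py sql params → Pre_bind_params_py sql params → Spec_bind_params_py sql params (bind_params_py sql params)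

-- ===== LEMMAS AND PROOFS =====

-- unfoldings of B's partition recursion, one head character at a time
theorem pvB_cons_ne (c : Char) (cs : List Char) (ps : List String) (hc : ¬ c = '?') :
    pvB (c :: cs) ps = (pvB cs ps).map (fun t => c :: t) := by
  have hd : (c :: cs).dropWhile (· ≠ '?') = cs.dropWhile (· ≠ '?') := by
    simp [List.dropWhile, hc]
  have ht : (c :: cs).takeWhile (· ≠ '?') = c :: cs.takeWhile (· ≠ '?') := by
    simp [List.takeWhile, hc]
  rw [pvB.eq_def]
  split <;> rename_i h1 <;> rw [hd] at h1
  · rw [ht, pvB.eq_def, h1]; rfl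
  · rename_i x after
    cases ps with
    | nil => rw [pvB.eq_def, h1]; rfl
    | cons v vs =>
      rw [pvB.eq_def, h1]
      show _ = Option.map _ (Option.map _ _)
      simp [Option.map_map, Function.comp_def, List.takeWhile, hc]

theorem pvB_cons_q (cs : List Char) (ps : List String) :
    pvB ('?' :: cs) ps =
      match ps with
      | [] => none
      | v :: vs => (pvB cs vs).map (fun t => pvQuote v ++ t) := by
  have hd : ('?' :: cs).dropWhile (· ≠ '?') = '?' :: cs := by simp [List.dropWhile]
  have ht : ('?' :: cs).takeWhile (· ≠ '?') = [] := by simp [List.takeWhile]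
  rw [pvB.eq_def]
  split <;> rename_i h1 <;> rw [hd] at h1
  · cases h1
  · cases h1
    cases ps with
    | nil => rfl
    | cons v vs => simp [List.takeWhile]

-- A's accumulator loop computes B's recursion, appended after the accumulator
theorem pvGoA_eq_pvB (l : List Char) (ps : List String) (acc : List Char) :
    pvGoA l ps acc = (pvB l ps).map (fun t => acc ++ t) := by
  induction l generalizing ps acc with
  | nil =>
    rw [pvB.eq_def]; simp [pvGoA, List.takeWhile]
  | cons c cs ih =>
    by_cases hc : c = '?'
    · subst hc
      rw [pvB_cons_q]
      cases ps with
      | nil => simp [pvGoA]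
      | cons v vs =>
        simp only [pvGoA, if_pos]
        rw [ih]
        simp [pvQuote, Option.map_map, Function.comp_def, List.append_assoc]
    · simp only [pvGoA, if_neg hc]
      rw [ih, pvB_cons_ne c cs ps hc]
      simp [Option.map_map, Function.comp_def]

-- ===== VERDICT (by name: the statement is the Claim_ definition above) =====
theorem bind_params_py_spec : Claim_equal_bind_params_py := by
  intro sql params _ _
  unfold Spec_bind_params_py bind_params_py bind_params_py_alt
  rw [pvGoA_eq_pvB]
  cases pvB sql.toList params <;> simp
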